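-- pv_equiv track=rewrite | github.com/Diogo-Serra/42_School | python_modules/module03/ex4/ft_inventory_system.py | get_most_abundant
-- ===== SOURCE A (Python) =====
-- def get_most_abundant(inventory: dict[str, int]) -> tuple[str, int]:
--     first_item = list(inventory.keys())[0]
--     most_name = first_item
--     most_quantity = inventory[first_item]
--
--     for item_name in inventory:
--         if inventory[item_name] > most_quantity:
--             most_name = item_name
--             most_quantity = inventory[item_name]
--     return most_name, most_quantity
-- ===== SOURCE B (Python) =====
-- def get_most_abundant(inventory: dict[str, int]) -> tuple[str, int]:
--     ordered = sorted(inventory.items(), key=lambda kv: kv[1], reverse=True)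
--     name, qty = ordered[0]
--     return name, qty
-- ===== Notes on version B (the rewrite author's own statement) =====
-- stated objective: alternative
-- what changed: Replaces the scan-for-strict-maximum loop with a stable reverse sort of the items by quantity followed by taking the first element; sort stability preserves A's earliest-max tie-break.
import Mathlib
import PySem

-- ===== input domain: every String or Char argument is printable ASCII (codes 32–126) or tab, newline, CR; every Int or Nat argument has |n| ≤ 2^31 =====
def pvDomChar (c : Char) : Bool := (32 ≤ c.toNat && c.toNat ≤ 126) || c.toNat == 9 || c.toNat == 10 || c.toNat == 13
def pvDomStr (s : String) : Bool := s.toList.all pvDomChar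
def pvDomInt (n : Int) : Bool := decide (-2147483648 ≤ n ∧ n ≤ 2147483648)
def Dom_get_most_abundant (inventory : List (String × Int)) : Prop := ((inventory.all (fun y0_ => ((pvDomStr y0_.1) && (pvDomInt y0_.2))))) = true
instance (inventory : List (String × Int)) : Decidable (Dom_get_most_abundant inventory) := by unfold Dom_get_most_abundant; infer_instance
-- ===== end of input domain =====

-- B replaces A's scan-for-strict-maximum loop with a stable reverse sort by quantity followed by
-- taking the first element (objective: alternative; stability preserves A's earliest-max tie-break).

-- ===== PORT A =====
-- inventory[k] on the association list representing the dict (lookup = first match)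
def pyLookup (inventory : List (String × Int)) (k : String) : Int :=
  (((inventory.find? (fun p => p.1 == k)).map Prod.snd).getD 0)

def get_most_abundant (inventory : List (String × Int)) : String × Int :=
  match (inventory.map Prod.fst) with
  | [] => ("", 0)  -- list(inventory.keys())[0] raises IndexError here; excluded by Pre_
  | first_item :: _ =>
    (inventory.map Prod.fst).foldl
      (fun acc item_name =>
        if pyLookup inventory item_name > acc.2 then (item_name, pyLookup inventory item_name)
        else acc)
      (first_item, pyLookup inventory first_item)

-- ===== PORT B =====
def get_most_abundant_alt (inventory : List (String × Int)) : String × Int :=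
  let ordered := PySem.List.sorted inventory (fun kv => kv.2) true
  (PySem.List.pyGet? ordered 0).getD ("", 0)  -- ordered[0] raises IndexError on []; excluded by Pre_

-- ===== PRECONDITION & SPEC =====
-- Pre_ requires a nonempty inventory (both programs raise IndexError on an empty dict) and
-- distinct keys (the argument is a Python dict, whose keys are unique by construction).
def Pre_get_most_abundant (inventory : List (String × Int)) : Prop :=
  inventory ≠ [] ∧ (inventory.map Prod.fst).Nodup
instance (inventory : List (String × Int)) : Decidable (Pre_get_most_abundant inventory) := by
  unfold Pre_get_most_abundant; infer_instance

def pvWitness_get_most_abundant : (List (String × Int)) := [("apple", 3), ("pear", 7), ("plum", 7)]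

def Spec_get_most_abundant (inventory : List (String × Int)) (out : String × Int) : Prop := out = get_most_abundant_alt inventory
instance (inventory : List (String × Int)) (out : String × Int) : Decidable (Spec_get_most_abundant inventory out) := by unfold Spec_get_most_abundant; infer_instance

-- ===== CLAIM (what is proved, stated in full; the proofs are below) =====
def Claim_equal_get_most_abundant : Prop := ∀ (inventory : List (String × Int)), Dom_get_most_abundant inventory → Pre_get_most_abundant inventory → Spec_get_most_abundant inventory (get_most_abundant inventory)

-- ===== LEMMAS AND PROOFS =====

-- the scan step of A, on pairs
def pvStep (acc p : String × Int) : String × Int := if acc.2 < p.2 then p else acc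

-- head of the insertion-sort fold = the running first-maximum scan
theorem pv_head_foldl_insertBy (l : List (String × Int)) :
    ∀ (acc : List (String × Int)) (m : String × Int), acc.head? = some m →
    (l.foldl (fun acc x =>
        PySem.List.insertBy (fun a b => decide ((fun kv : String × Int => kv.2) b <
          (fun kv : String × Int => kv.2) a)) x acc) acc).head? = some (l.foldl pvStep m) := by
  induction l with
  | nil => intro acc m h; simpa using h
  | cons x t ih =>
    intro acc m h
    match acc, h with
    | m :: rest, rfl =>
      simp only [List.foldl_cons]
      by_cases hlt : m.2 < x.2
      · have : PySem.List.insertBy (fun a b => decide ((fun kv : String × Int => kv.2) b <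
            (fun kv : String × Int => kv.2) a)) x (m :: rest) = x :: m :: rest := by
          simp [PySem.List.insertBy, hlt]
        rw [this, ih _ x rfl]
        simp [pvStep, hlt]
      · have : PySem.List.insertBy (fun a b => decide ((fun kv : String × Int => kv.2) b <
            (fun kv : String × Int => kv.2) a)) x (m :: rest) =
            m :: PySem.List.insertBy (fun a b => decide ((fun kv : String × Int => kv.2) b <
              (fun kv : String × Int => kv.2) a)) x rest := by
          simp [PySem.List.insertBy, hlt]
        rw [this, ih _ m rfl]
        simp [pvStep, hlt]

-- under distinct keys, looking a member's key up returns its value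
theorem pv_lookup_mem (inventory : List (String × Int))
    (hnd : (inventory.map Prod.fst).Nodup) (p : String × Int) (hp : p ∈ inventory) :
    pyLookup inventory p.1 = p.2 := by
  induction inventory with
  | nil => cases hp
  | cons q t ih =>
    simp only [List.map_cons, List.nodup_cons] at hnd
    rcases List.mem_cons.1 hp with rfl | hpt
    · simp [pyLookup]
    · have hne : q.1 ≠ p.1 := by
        intro h; exact hnd.1 (h ▸ List.mem_map_of_mem hpt)
      have := ih hnd.2 hpt
      simpa [pyLookup, hne] using this

-- A's fold over keys is the pair scan pvStep (under distinct keys)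
theorem pv_A_eq_scan (inventory : List (String × Int))
    (hnd : (inventory.map Prod.fst).Nodup) (init : String × Int) :
    (inventory.map Prod.fst).foldl
      (fun acc item_name =>
        if pyLookup inventory item_name > acc.2 then (item_name, pyLookup inventory item_name)
        else acc) init
    = inventory.foldl pvStep init := by
  rw [List.foldl_map]
  apply PySem.List.foldl_congr_mem
  intro acc p hp
  have h := pv_lookup_mem inventory hnd p hp
  simp [h, pvStep, gt_iff_lt]

-- ===== VERDICT (by name: the statement is the Claim_ definition above) =====
theorem get_most_abundant_spec : Claim_equal_get_most_abundant := by
  intro inventory _ hpre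
  obtain ⟨hne, hnd⟩ := hpre
  unfold Spec_get_most_abundant
  match inventory, hne with
  | p :: rest, _ =>
    have hA : get_most_abundant (p :: rest) = (p :: rest).foldl pvStep p := by
      have hl : pyLookup (p :: rest) p.1 = p.2 := by simp [pyLookup]
      simp only [get_most_abundant, List.map_cons]
      rw [show (p.1 :: rest.map Prod.fst) = (p :: rest).map Prod.fst from rfl,
        pv_A_eq_scan (p :: rest) hnd (p.1, pyLookup (p :: rest) p.1)]
      rw [hl]
    have hscan : (p :: rest).foldl pvStep p = rest.foldl pvStep p := by
      simp [List.foldl_cons, pvStep]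
    have hB : (PySem.List.sorted (p :: rest) (fun kv => kv.2) true).head? =
        some (rest.foldl pvStep p) := by
      rw [PySem.List.sorted_rev_eq_foldl_insertBy]
      simp only [List.foldl_cons]
      have h0 : PySem.List.insertBy (fun a b => decide ((fun kv : String × Int => kv.2) b <
          (fun kv : String × Int => kv.2) a)) p ([] : List (String × Int)) = [p] := by
        simp [PySem.List.insertBy]
      rw [h0]
      exact pv_head_foldl_insertBy rest [p] p rfl
    rw [hA, hscan]
    simp only [get_most_abundant_alt]
    cases hs : PySem.List.sorted (p :: rest) (fun kv => kv.2) true with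
    | nil => exact absurd hs (by simp [PySem.List.sorted_eq_nil_iff])
    | cons m t =>
      rw [hs] at hB
      simp only [List.head?] at hB
      have hidx : PySem.List.pyIdx? (t.length + 1) 0 = some 0 := by
        simp [PySem.List.pyIdx?]
      simp [PySem.List.pyGet?, hidx, ← Option.some_inj.1 hB]
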